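-- pv_equiv track=rewrite | github.com/p-lots/codewars | 7-kyu/sum-the-repeats/python/solution.py | repeat_sum
-- ===== SOURCE A (Python) =====
-- from collections import Counter
--
-- def repeat_sum(l):
--     l_sets = [set(sublist) for sublist in l]
--     all_numbers = set([n for lst in l for n in lst])
--     all_count = Counter()
--     for n in all_numbers:
--         for sublist in l_sets:
--             all_count[n] += int(n in sublist)
--     return sum(n for n, count in all_count.items() if count > 1)
-- ===== SOURCE B (Python) =====
-- def repeat_sum(l):
--     seen = set()
--     repeated = set()
--     for sub in l:
--         s = set(sub)
--         repeated |= seen & s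
--         seen |= s
--     return sum(repeated)
-- ===== Notes on version B (the rewrite author's own statement) =====
-- stated objective: faster
-- what changed: Replaces the distinct-values-times-sublists counting loop (Counter over all_numbers x l_sets membership tests) with a single seen/repeated two-set sweep over the sublists.
import Mathlib
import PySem

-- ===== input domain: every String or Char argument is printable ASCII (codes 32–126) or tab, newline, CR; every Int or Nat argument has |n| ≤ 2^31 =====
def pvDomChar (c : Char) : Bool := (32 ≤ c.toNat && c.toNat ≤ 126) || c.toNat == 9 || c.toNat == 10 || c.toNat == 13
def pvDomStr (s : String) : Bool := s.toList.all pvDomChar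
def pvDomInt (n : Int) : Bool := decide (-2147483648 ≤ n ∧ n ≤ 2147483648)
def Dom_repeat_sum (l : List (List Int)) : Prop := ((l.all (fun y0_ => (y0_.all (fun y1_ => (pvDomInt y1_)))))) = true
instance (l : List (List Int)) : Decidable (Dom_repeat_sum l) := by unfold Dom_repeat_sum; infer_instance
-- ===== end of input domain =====

-- B replaces A's Counter-over-all-distinct-values loop with a single seen/repeated two-set sweep over the sublists.

-- ===== PORT A =====
def repeat_sum (l : List (List Int)) : Int :=
  let l_sets : List (PySem.Set Int) := l.map (fun sublist => PySem.Set.ofList sublist)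
  let all_numbers : PySem.Set Int := PySem.Set.ofList (l.flatMap (fun lst => lst))
  let all_count : PySem.Dict Int Int :=
    all_numbers.foldl (fun d n =>
      l_sets.foldl (fun d sublist =>
        d.modify n 0 (fun c => c + (if PySem.Set.contains sublist n then 1 else 0))) d)
      PySem.Dict.empty
  (((all_count.items.filter (fun p => decide (1 < p.2))).map (fun p => p.1)).sum)

-- ===== PORT B =====
def repeat_sum_alt (l : List (List Int)) : Int :=
  let st :=
    l.foldl (fun st sub =>
      let s := PySem.Set.ofList sub
      (PySem.Set.union st.1 s, PySem.Set.union st.2 (PySem.Set.inter st.1 s)))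
      ((PySem.Set.empty : PySem.Set Int), (PySem.Set.empty : PySem.Set Int))
  st.2.sum

-- ===== PRECONDITION & SPEC =====
def Spec_repeat_sum (l : List (List Int)) (out : Int) : Prop := out = repeat_sum_alt l
instance (l : List (List Int)) (out : Int) : Decidable (Spec_repeat_sum l out) := by unfold Spec_repeat_sum; infer_instance

-- ===== CLAIM (what is proved, stated in full; the proofs are below) =====
def Claim_equal_repeat_sum : Prop := ∀ (l : List (List Int)), Dom_repeat_sum l → Spec_repeat_sum l (repeat_sum l)

-- ===== LEMMAS AND PROOFS =====

def pvCnt (l : List (List Int)) (x : Int) : Nat := l.countP (fun s => decide (x ∈ s))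

-- B side invariant
lemma B_mem (l : List (List Int)) (seen rep : List Int) (x : Int) :
    x ∈ (l.foldl (fun st sub =>
      (PySem.Set.union st.1 (PySem.Set.ofList sub),
       PySem.Set.union st.2 (PySem.Set.inter st.1 (PySem.Set.ofList sub)))) (seen, rep)).2
    ↔ x ∈ rep ∨ 2 ≤ (if x ∈ seen then 1 else 0) + pvCnt l x := by
  induction l generalizing seen rep with
  | nil => simp [pvCnt]; split_ifs <;> omega
  | cons s t ih =>
    simp only [List.foldl_cons]
    rw [ih]
    simp only [PySem.Set.mem_union, PySem.Set.mem_inter, PySem.Set.mem_ofList, pvCnt,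
      List.countP_cons]
    by_cases hs : x ∈ seen <;> by_cases hx : x ∈ s <;>
      simp only [hs, hx, if_true, if_false, decide_true, decide_false] <;> (by_cases hr : x ∈ rep <;> simp [hr] <;>
        first
          | omega
          | (rw [show (2:ℕ) ≤ 1 + List.countP (fun s => decide (x ∈ s)) t ↔
                  0 < List.countP (fun s => decide (x ∈ s)) t from by omega,
                List.countP_pos_iff]; simp))

lemma B_nodup (l : List (List Int)) (seen rep : List Int) (h : rep.Nodup) :
    (l.foldl (fun st sub =>
      (PySem.Set.union st.1 (PySem.Set.ofList sub),
       PySem.Set.union st.2 (PySem.Set.inter st.1 (PySem.Set.ofList sub)))) (seen, rep)).2.Nodup := by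
  induction l generalizing seen rep with
  | nil => exact h
  | cons s t ih => exact ih _ _ (PySem.Set.nodup_union _ _ h)

lemma keys_insert_eq_add (d : PySem.Dict Int Int) (k : Int) (v : Int) :
    (d.insert k v).keys = PySem.Set.add d.keys k := by
  by_cases h : d.contains k = true
  · rw [PySem.Dict.keys_insert_of_contains d v h,
      PySem.Set.add_of_mem ((PySem.Dict.contains_iff_mem_keys _ _).mp h)]
  · rw [PySem.Dict.keys_insert_of_not_contains d v (by simpa using h),
      PySem.Set.add_of_not_mem (fun hm => h ((PySem.Dict.contains_iff_mem_keys _ _).mpr hm))]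

-- A side: the inner loop over l_sets for a fixed key n
lemma A_inner_getD (L : List (PySem.Set Int)) (d : PySem.Dict Int Int) (n m : Int) :
    (L.foldl (fun d sub =>
        d.modify n 0 (fun c => c + (if PySem.Set.contains sub n then 1 else 0))) d).getD m 0
    = d.getD m 0 + (if m = n then (L.countP (fun s => PySem.Set.contains s n) : Int) else 0) := by
  induction L generalizing d with
  | nil => simp
  | cons s t ih =>
    simp only [List.foldl_cons, ih, PySem.Dict.getD_modify, List.countP_cons]
    by_cases hm : m = n <;> first | (simp [hm]; split_ifs <;> omega) | simp [hm]

lemma A_inner_keys (L : List (PySem.Set Int)) (hL : L ≠ []) (d : PySem.Dict Int Int) (n : Int) :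
    (L.foldl (fun d sub =>
        d.modify n 0 (fun c => c + (if PySem.Set.contains sub n then 1 else 0))) d).keys
    = PySem.Set.add d.keys n := by
  induction L generalizing d with
  | nil => exact absurd rfl hL
  | cons s t ih =>
    by_cases ht : t = []
    · subst ht; simp only [List.foldl_cons, List.foldl_nil, PySem.Dict.keys_modify, keys_insert_eq_add]
    · simp only [List.foldl_cons, ih ht, PySem.Dict.keys_modify, keys_insert_eq_add]
      exact PySem.Set.add_of_mem (by simp [PySem.Set.mem_add])

lemma A_outer_keys (L : List (PySem.Set Int)) (hL : L ≠ []) (ns : List Int) (d : PySem.Dict Int Int) :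
    (ns.foldl (fun d n => L.foldl (fun d sub =>
        d.modify n 0 (fun c => c + (if PySem.Set.contains sub n then 1 else 0))) d) d).keys
    = PySem.Set.update d.keys ns := by
  induction ns generalizing d with
  | nil => simp [PySem.Set.update_nil]
  | cons n t ih => simp only [List.foldl_cons, ih, A_inner_keys L hL, PySem.Set.update_cons]

lemma A_outer_getD (L : List (PySem.Set Int)) (ns : List Int) (hns : ns.Nodup)
    (d : PySem.Dict Int Int) (m : Int) :
    (ns.foldl (fun d n => L.foldl (fun d sub =>
        d.modify n 0 (fun c => c + (if PySem.Set.contains sub n then 1 else 0))) d) d).getD m 0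
    = d.getD m 0 + (if m ∈ ns then (L.countP (fun s => PySem.Set.contains s m) : Int) else 0) := by
  induction ns generalizing d with
  | nil => simp
  | cons n t ih =>
    rcases List.nodup_cons.mp hns with ⟨hn, ht⟩
    simp only [List.foldl_cons, ih ht, A_inner_getD, List.mem_cons]
    by_cases hm : m = n
    · subst hm; simp [hn]
    · simp [hm]

lemma A_items (L : List (PySem.Set Int)) (hL : L ≠ []) (ns : List Int) (hns : ns.Nodup) :
    (ns.foldl (fun d n => L.foldl (fun d sub =>
        d.modify n 0 (fun c => c + (if PySem.Set.contains sub n then 1 else 0))) d)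
      (PySem.Dict.empty : PySem.Dict Int Int)).items
    = ns.map (fun k => (k, (L.countP (fun s => PySem.Set.contains s k) : Int))) := by
  have hkeys : (ns.foldl (fun d n => L.foldl (fun d sub =>
        d.modify n 0 (fun c => c + (if PySem.Set.contains sub n then 1 else 0))) d)
      (PySem.Dict.empty : PySem.Dict Int Int)).keys = ns := by
    rw [A_outer_keys L hL, PySem.Dict.keys_empty, PySem.Set.update_nil_left,
      PySem.Set.ofList_eq_self_of_nodup ns hns]
  rw [PySem.Dict.items_eq_map_keys _ (by rw [hkeys]; exact hns) 0, hkeys]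
  apply List.map_congr_left
  intro k hk
  rw [A_outer_getD L ns hns _ k]
  simp [PySem.Dict.getD_empty, hk]

lemma A_val (l : List (List Int)) (hl : l ≠ []) :
    repeat_sum l =
      ((PySem.Set.ofList (l.flatMap (fun lst => lst))).filter
        (fun k => decide (2 ≤ pvCnt l k))).sum := by
  have hL : (l.map (fun sublist => PySem.Set.ofList sublist)) ≠ [] := fun h => hl (by simpa using h)
  simp only [repeat_sum]
  rw [A_items _ hL _ (PySem.Set.nodup_ofList _), List.filter_map, List.map_map]
  have hfilt : List.filter ((fun p => decide (1 < p.2)) ∘ (fun k =>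
        (k, ((l.map (fun sublist => PySem.Set.ofList sublist)).countP
              (fun s => PySem.Set.contains s k) : Int))))
        (PySem.Set.ofList (l.flatMap (fun lst => lst)))
      = List.filter (fun k => decide (2 ≤ pvCnt l k))
        (PySem.Set.ofList (l.flatMap (fun lst => lst))) := by
    apply List.filter_congr
    intro k _
    have hc : (l.map (fun sublist => PySem.Set.ofList sublist)).countP
        (fun s => PySem.Set.contains s k) = pvCnt l k := by
      rw [List.countP_map]
      exact List.countP_congr (fun s _ => by simp [Function.comp, PySem.Set.mem_ofList])
    simp only [Function.comp, hc]
    exact decide_eq_decide.mpr (by omega)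
  rw [hfilt,
    show ((fun (p : Int × Int) => p.1) ∘ fun k =>
      (k, ((l.map (fun sublist => PySem.Set.ofList sublist)).countP
            (fun s => PySem.Set.contains s k) : Int))) = fun k => k from rfl,
    List.map_id']

lemma B_val (l : List (List Int)) :
    repeat_sum_alt l =
      ((l.foldl (fun st sub =>
        (PySem.Set.union st.1 (PySem.Set.ofList sub),
         PySem.Set.union st.2 (PySem.Set.inter st.1 (PySem.Set.ofList sub))))
        (PySem.Set.empty, PySem.Set.empty)).2).sum := rfl

lemma repeat_sum_eq_alt (l : List (List Int)) : repeat_sum l = repeat_sum_alt l := by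
  rcases eq_or_ne l [] with rfl | hl
  · rfl
  · rw [A_val l hl, B_val]
    apply List.Perm.sum_eq
    apply (List.perm_ext_iff_of_nodup (List.Nodup.filter _ (PySem.Set.nodup_ofList _))
      (B_nodup l _ _ List.nodup_nil)).mpr
    intro x
    rw [B_mem, List.mem_filter]
    simp only [PySem.Set.mem_ofList, List.mem_flatMap, List.not_mem_nil, false_or,
      PySem.Set.empty, decide_eq_true_eq, if_false, Nat.zero_add]
    constructor
    · rintro ⟨-, h⟩; exact h
    · intro h
      refine ⟨?_, h⟩
      have : 0 < pvCnt l x := by omega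
      rcases List.countP_pos_iff.mp this with ⟨s, hs, hx⟩
      exact ⟨s, hs, by simpa using hx⟩


-- ===== VERDICT (by name: the statement is the Claim_ definition above) =====
theorem repeat_sum_spec : Claim_equal_repeat_sum := by
  intro l _
  show repeat_sum l = repeat_sum_alt l
  exact repeat_sum_eq_alt l
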